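-- pv_equiv track=rewrite | github.com/andrewfroehlich/AdventOfCode | 2024/10/main.py | dfs
-- ===== SOURCE A (Python) =====
-- from collections import deque
--
-- def dfs(grid, i, j):
--     visited,nines,part2 = set(),set(),0
--     dfs = deque()
--     dfs.append( (i,j) )
--     while dfs:
--         x,y = dfs.popleft()
--         visited.add( (x,y) )
--         current = int(grid[x][y])
--         if current == 9:
--             part2 += 1
--             nines.add( (x,y) )
--             continue
--         for i,j in [(-1,0),(1,0),(0,-1),(0,1)]:
--             if 0<=(x+i)<len(grid) and 0<=(y+j)<len(grid[x+i]) and (x+i,y+j) not in visited and int(grid[x+i][y+j]) == current+1: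
--                 dfs.append( (x+i,y+j) )
--     return len(nines),part2 # part1 val, part2 val
-- ===== SOURCE B (Python) =====
-- def dfs(grid, i, j):
--     # recursive descent: strictly increasing heights make a visited set unnecessary,
--     # and path multiplicity is kept because there is no memoization
--     nines = set()
--
--     def rec(x, y):
--         current = int(grid[x][y])
--         if current == 9:
--             nines.add((x, y))
--             return 1
--         total = 0
--         for dx, dy in ((-1, 0), (1, 0), (0, -1), (0, 1)):
--             nx, ny = x + dx, y + dy
--             if 0 <= nx < len(grid) and 0 <= ny < len(grid[nx]) and int(grid[nx][ny]) == current + 1: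
--                 total += rec(nx, ny)
--         return total
--
--     part2 = rec(i, j)
--     return len(nines), part2
-- ===== Notes on version B (the rewrite author's own statement) =====
-- stated objective: simpler
-- what changed: A's iterative BFS over an explicit deque with a visited set is replaced by a direct recursive traversal that sums path counts over the four neighbours; strictly increasing heights make the queue and the visited set unnecessary.
import Mathlib
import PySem

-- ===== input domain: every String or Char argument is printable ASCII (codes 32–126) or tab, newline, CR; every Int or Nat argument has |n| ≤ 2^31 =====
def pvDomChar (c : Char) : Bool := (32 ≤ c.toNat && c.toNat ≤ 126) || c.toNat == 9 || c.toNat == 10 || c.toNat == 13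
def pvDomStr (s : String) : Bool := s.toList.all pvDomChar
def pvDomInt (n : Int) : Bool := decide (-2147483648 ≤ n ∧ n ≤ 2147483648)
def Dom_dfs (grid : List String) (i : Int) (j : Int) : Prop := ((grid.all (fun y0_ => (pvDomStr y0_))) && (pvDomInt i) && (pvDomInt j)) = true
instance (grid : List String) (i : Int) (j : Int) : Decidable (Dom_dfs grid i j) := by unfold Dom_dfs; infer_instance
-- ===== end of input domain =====

-- B replaces A's BFS (deque + visited set) by a direct recursion over the four neighbours
-- summing path counts; same return value, objective: simpler.

-- shared cell-reading helpers (both Pythons read the grid the same way)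
-- int(grid[x][y]): none exactly where Python raises IndexError/ValueError
def pvVal (grid : List String) (x : Int) (y : Int) : Option Int :=
  match PySem.List.pyGet? grid x with
  | none => none
  | some row =>
    match PySem.Str.pyGet? row y with
    | none => none
    | some c => PySem.Int.ofChars? [c]

-- len(grid[x]); only evaluated after 0 ≤ x < len(grid) has been checked
def pvRowLen (grid : List String) (x : Int) : Int :=
  match PySem.List.pyGet? grid x with
  | none => 0
  | some row => PySem.Str.len row

def pvDirs : List (Int × Int) := [(-1, 0), (1, 0), (0, -1), (0, 1)]

-- ===== PORT A =====
-- the inner 'for i,j in [...]' loop of A, appending matching neighbours to the queue q0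
def dfsNbrs (grid : List String) (visited : PySem.Set (Int × Int)) (x y current : Int)
    (q0 : List (Int × Int)) : List (Int × Int) :=
  pvDirs.foldl (fun q d =>
    if 0 ≤ x + d.1 ∧ x + d.1 < (grid.length : Int) ∧ 0 ≤ y + d.2 ∧ y + d.2 < pvRowLen grid (x + d.1)
        ∧ (x + d.1, y + d.2) ∉ visited ∧ pvVal grid (x + d.1) (y + d.2) = some (current + 1)
    then q ++ [(x + d.1, y + d.2)] else q) q0

-- A's while loop over the deque; fuel only makes it total (never exhausted under Pre_)
def dfsLoop (grid : List String) : Nat → List (Int × Int) → PySem.Set (Int × Int) →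
    PySem.Set (Int × Int) → Int → PySem.Set (Int × Int) × Int
  | 0, _, _, nines, part2 => (nines, part2)
  | _ + 1, [], _, nines, part2 => (nines, part2)
  | fuel + 1, (x, y) :: rest, visited, nines, part2 =>
    let visited' := PySem.Set.add visited (x, y)
    match pvVal grid x y with
    | none => (nines, part2)  -- Python raises here (outside Pre_)
    | some current =>
      if current = 9 then
        dfsLoop grid fuel rest visited' (PySem.Set.add nines (x, y)) (part2 + 1)
      else
        dfsLoop grid fuel (dfsNbrs grid visited' x y current rest) visited' nines part2

def dfs (grid : List String) (i : Int) (j : Int) : Int × Int :=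
  let r := dfsLoop grid 1953126 [(i, j)] PySem.Set.empty PySem.Set.empty 0
  ((r.1.length : Int), r.2)

-- ===== PORT B =====
-- rec(x, y) from Source B: returns the path count and threads the shared 'nines' set;
-- fuel only makes it total (heights are digits, so depth 10 is never exhausted under Pre_)
def dfsRec (grid : List String) : Nat → Int → Int → PySem.Set (Int × Int) →
    Int × PySem.Set (Int × Int)
  | 0, _, _, nines => (0, nines)
  | fuel + 1, x, y, nines =>
    match pvVal grid x y with
    | none => (0, nines)  -- Python raises here (outside Pre_)
    | some current =>
      if current = 9 then (1, PySem.Set.add nines (x, y))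
      else
        pvDirs.foldl (fun acc d =>
          if 0 ≤ x + d.1 ∧ x + d.1 < (grid.length : Int) ∧ 0 ≤ y + d.2 ∧ y + d.2 < pvRowLen grid (x + d.1)
              ∧ pvVal grid (x + d.1) (y + d.2) = some (current + 1)
          then
            let r := dfsRec grid fuel (x + d.1) (y + d.2) acc.2
            (acc.1 + r.1, r.2)
          else acc) (0, nines)

def dfs_alt (grid : List String) (i : Int) (j : Int) : Int × Int :=
  let r := dfsRec grid 10 i j PySem.Set.empty
  ((r.2.length : Int), r.1)

-- ===== PRECONDITION & SPEC =====
-- every cell the height-increasing traversal can read parses as int (heights rise by 1 per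
-- step, so depth 10 encloses every path); this decides domain membership only, it computes
-- neither program's output
def pvReadsOK (grid : List String) : Nat → Int → Int → Bool
  | 0, _, _ => true
  | fuel + 1, x, y =>
    match pvVal grid x y with
    | none => false
    | some c =>
      if c = 9 then true
      else pvDirs.all (fun d =>
        if 0 ≤ x + d.1 ∧ x + d.1 < (grid.length : Int) ∧ 0 ≤ y + d.2 ∧ y + d.2 < pvRowLen grid (x + d.1) then
          match pvVal grid (x + d.1) (y + d.2) with
          | none => false
          | some c' => if c' = c + 1 then pvReadsOK grid fuel (x + d.1) (y + d.2) else true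
        else true)

-- Pre_ holds exactly where Python A returns: A raises IndexError/ValueError as soon as the
-- traversal indexes out of range or int() meets a non-digit cell
def Pre_dfs (grid : List String) (i : Int) (j : Int) : Prop :=
  pvReadsOK grid 10 i j = true
instance (grid : List String) (i : Int) (j : Int) : Decidable (Pre_dfs grid i j) := by
  unfold Pre_dfs; infer_instance

def pvWitness_dfs : List String × Int × Int := (["0123", "1234", "9899"], 0, 0)

def Spec_dfs (grid : List String) (i : Int) (j : Int) (out : Int × Int) : Prop := out = dfs_alt grid i j
instance (grid : List String) (i : Int) (j : Int) (out : Int × Int) : Decidable (Spec_dfs grid i j out) := by unfold Spec_dfs; infer_instance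

-- ===== CLAIM (what is proved, stated in full; the proofs are below) =====
def Claim_equal_dfs : Prop := ∀ (grid : List String) (i : Int) (j : Int), Dom_dfs grid i j → Pre_dfs grid i j → Spec_dfs grid i j (dfs grid i j)

-- ===== LEMMAS AND PROOFS =====

-- grids made of domain (printable-ASCII) characters
def DomGrid (grid : List String) : Prop :=
  ∀ row ∈ grid, ∀ ch ∈ row.toList, pvDomChar ch = true

-- the neighbour condition, as the Bool both folds test (minus A's visited check)
def pvOkB (grid : List String) (x y c : Int) (d : Int × Int) : Bool :=
  decide (0 ≤ x + d.1 ∧ x + d.1 < (grid.length : Int) ∧ 0 ≤ y + d.2 ∧ y + d.2 < pvRowLen grid (x + d.1)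
      ∧ pvVal grid (x + d.1) (y + d.2) = some (c + 1))

def pvChild (x y : Int) (d : Int × Int) : Int × Int := (x + d.1, y + d.2)

def childrenL (grid : List String) (x y c : Int) : List (Int × Int) :=
  (pvDirs.filter (pvOkB grid x y c)).map (pvChild x y)

-- canonical fuel for a cell, path count and reachable-nine set (the common spec)
def pvFuel (grid : List String) (p : Int × Int) : Nat :=
  match pvVal grid p.1 p.2 with
  | some c => (10 - c).toNat
  | none => 0

def specP (grid : List String) : Nat → Int → Int → Int
  | 0, _, _ => 0
  | fuel + 1, x, y =>
    match pvVal grid x y with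
    | none => 0
    | some c =>
      if c = 9 then 1
      else ((childrenL grid x y c).map (fun p => specP grid fuel p.1 p.2)).sum

def specN (grid : List String) : Nat → Int → Int → Finset (Int × Int)
  | 0, _, _ => ∅
  | fuel + 1, x, y =>
    match pvVal grid x y with
    | none => ∅
    | some c =>
      if c = 9 then {(x, y)}
      else ((childrenL grid x y c).map (fun p => specN grid fuel p.1 p.2)).foldr (· ∪ ·) ∅

def fP (grid : List String) (p : Int × Int) : Int := specP grid (pvFuel grid p) p.1 p.2
def fN (grid : List String) (p : Int × Int) : Finset (Int × Int) := specN grid (pvFuel grid p) p.1 p.2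

def sumP (grid : List String) (L : List (Int × Int)) : Int := (L.map (fP grid)).sum
def unFold (l : List (Finset (Int × Int))) : Finset (Int × Int) := l.foldr (· ∪ ·) ∅

def unN (grid : List String) (L : List (Int × Int)) : Finset (Int × Int) := unFold (L.map (fN grid))

def wgt (grid : List String) (p : Int × Int) : Nat :=
  match pvVal grid p.1 p.2 with
  | some c => 5 ^ (9 - c).toNat
  | none => 0

def phi (grid : List String) (L : List (Int × Int)) : Nat := (L.map (wgt grid)).sum

theorem charParse_bounds (ch : Char) (hdom : pvDomChar ch = true) :
    (match PySem.Int.ofChars? [ch] with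
     | none => true
     | some c => decide (0 ≤ c ∧ c ≤ 9)) = true := by
  have hb : 9 ≤ ch.toNat ∧ ch.toNat ≤ 126 := by
    simp [pvDomChar] at hdom
    omega
  have hv : Char.ofNat ch.toNat = ch := Char.ofNat_toNat ch
  obtain ⟨h1, h2⟩ := hb
  interval_cases hn : ch.toNat <;> rw [← hv] <;> decide

theorem val_bounds (grid : List String) (x y c : Int) (hd : DomGrid grid)
    (h : pvVal grid x y = some c) : 0 ≤ c ∧ c ≤ 9 := by
  cases hr : PySem.List.pyGet? grid x with
  | none => simp only [pvVal, hr] at h; exact absurd h (by simp)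
  | some row =>
    cases hc : PySem.Str.pyGet? row y with
    | none => simp only [pvVal, hr, hc] at h; exact absurd h (by simp)
    | some ch =>
      simp only [pvVal, hr, hc] at h
      have hrow : row ∈ grid := PySem.List.mem_of_pyGet?_eq_some _ hr
      have hmem : ch ∈ row.toList := by
        unfold PySem.Str.pyGet? PySem.Chars.pyGet? at hc
        exact PySem.List.mem_of_pyGet?_eq_some _ hc
      have hdig := charParse_bounds ch (hd row hrow ch hmem)
      rw [h] at hdig
      exact of_decide_eq_true hdig

theorem mem_childrenL (grid : List String) (x y c : Int) (p : Int × Int)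
    (h : p ∈ childrenL grid x y c) : pvVal grid p.1 p.2 = some (c + 1) := by
  simp only [childrenL, List.mem_map, List.mem_filter, pvOkB, pvChild, decide_eq_true_eq] at h
  obtain ⟨d, ⟨-, hok⟩, rfl⟩ := h
  exact hok.2.2.2.2

theorem len_childrenL (grid : List String) (x y c : Int) :
    (childrenL grid x y c).length ≤ 4 := by
  have h1 := List.length_filter_le (pvOkB grid x y c) pvDirs
  simpa [childrenL, pvDirs] using h1

theorem fP_nine (grid : List String) (x y : Int) (h : pvVal grid x y = some 9) :
    fP grid (x, y) = 1 ∧ fN grid (x, y) = {(x, y)} := by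
  have hf : pvFuel grid (x, y) = 1 := by simp [pvFuel, h]
  constructor
  · simp [fP, hf, specP, h]
  · simp [fN, hf, specN, h]

theorem fP_step (grid : List String) (x y c : Int) (hd : DomGrid grid)
    (h : pvVal grid x y = some c) (h9 : c ≠ 9) :
    fP grid (x, y) = sumP grid (childrenL grid x y c) ∧
    fN grid (x, y) = unN grid (childrenL grid x y c) := by
  obtain ⟨hc0, hc9⟩ := val_bounds grid x y c hd h
  have hf : pvFuel grid (x, y) = (9 - c).toNat + 1 := by
    simp only [pvFuel, h]; omega
  have hch : ∀ p ∈ childrenL grid x y c, pvFuel grid p = (9 - c).toNat := by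
    intro p hp
    have hv := mem_childrenL grid x y c p hp
    simp only [pvFuel, hv]; omega
  constructor
  · rw [fP, hf]
    simp only [specP, h, if_neg h9, sumP]
    apply congrArg List.sum
    apply List.map_congr_left
    intro p hp
    rw [fP, hch p hp]
  · rw [fN, hf]
    simp only [specN, h, if_neg h9, unN, unFold]
    apply congrArg (List.foldr (· ∪ ·) ∅)
    apply List.map_congr_left
    intro p hp
    rw [fN, hch p hp]

theorem unFold_append (l1 l2 : List (Finset (Int × Int))) :
    unFold (l1 ++ l2) = unFold l1 ∪ unFold l2 := by
  induction l1 with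
  | nil => simp [unFold]
  | cons a l ih => simp [unFold, List.foldr_cons] at ih ⊢; rw [ih]

theorem unN_append (grid : List String) (L1 L2 : List (Int × Int)) :
    unN grid (L1 ++ L2) = unN grid L1 ∪ unN grid L2 := by
  simp only [unN, List.map_append, unFold_append]

theorem unN_cons (grid : List String) (p : Int × Int) (L : List (Int × Int)) :
    unN grid (p :: L) = fN grid p ∪ unN grid L := rfl

theorem sumP_append (grid : List String) (L1 L2 : List (Int × Int)) :
    sumP grid (L1 ++ L2) = sumP grid L1 + sumP grid L2 := by
  simp only [sumP, List.map_append, List.sum_append]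

theorem sumP_cons (grid : List String) (p : Int × Int) (L : List (Int × Int)) :
    sumP grid (p :: L) = fP grid p + sumP grid L := rfl

theorem phi_append (grid : List String) (L1 L2 : List (Int × Int)) :
    phi grid (L1 ++ L2) = phi grid L1 + phi grid L2 := by
  simp only [phi, List.map_append, List.sum_append]

theorem phi_cons (grid : List String) (p : Int × Int) (L : List (Int × Int)) :
    phi grid (p :: L) = wgt grid p + phi grid L := rfl

theorem toFinset_add (s : PySem.Set (Int × Int)) (p : Int × Int) :
    (PySem.Set.add s p).toFinset = insert p s.toFinset := by
  rw [PySem.Set.add_eq_ite]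
  split_ifs with h
  · rw [Finset.insert_eq_self.mpr (List.mem_toFinset.mpr h)]
  · simp [List.toFinset_append, Finset.union_singleton]

theorem recB_spec (grid : List String) (hd : DomGrid grid) :
    ∀ fuel x y c (s : PySem.Set (Int × Int)), pvVal grid x y = some c → (10 - c).toNat ≤ fuel →
    s.Nodup →
    (dfsRec grid fuel x y s).1 = fP grid (x, y) ∧
    (dfsRec grid fuel x y s).2.Nodup ∧
    (dfsRec grid fuel x y s).2.toFinset = s.toFinset ∪ fN grid (x, y) := by
  intro fuel
  induction fuel with
  | zero =>
    intro x y c s hv hf hs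
    obtain ⟨h1, h2⟩ := val_bounds grid x y c hd hv
    omega
  | succ f ih =>
    intro x y c s hv hf hs
    obtain ⟨hc0, hc9⟩ := val_bounds grid x y c hd hv
    by_cases h9 : c = 9
    · subst h9
      obtain ⟨hp1, hn1⟩ := fP_nine grid x y hv
      simp only [dfsRec, hv, if_true]
      exact ⟨hp1.symm, PySem.Set.nodup_add _ _ hs,
        by rw [toFinset_add, hn1, Finset.union_singleton]⟩
    · obtain ⟨hfp, hfn⟩ := fP_step grid x y c hd hv h9
      simp only [dfsRec, hv, if_neg h9]
      have main : ∀ (l : List (Int × Int)) (a : Int) (s0 : PySem.Set (Int × Int)), s0.Nodup →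
          (List.foldl (fun acc d =>
            if 0 ≤ x + d.1 ∧ x + d.1 < (grid.length : Int) ∧ 0 ≤ y + d.2 ∧ y + d.2 < pvRowLen grid (x + d.1)
                ∧ pvVal grid (x + d.1) (y + d.2) = some (c + 1)
            then (acc.1 + (dfsRec grid f (x + d.1) (y + d.2) acc.2).1, (dfsRec grid f (x + d.1) (y + d.2) acc.2).2)
            else acc) (a, s0) l).1
            = a + sumP grid ((l.filter (pvOkB grid x y c)).map (pvChild x y)) ∧
          (List.foldl (fun acc d =>
            if 0 ≤ x + d.1 ∧ x + d.1 < (grid.length : Int) ∧ 0 ≤ y + d.2 ∧ y + d.2 < pvRowLen grid (x + d.1)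
                ∧ pvVal grid (x + d.1) (y + d.2) = some (c + 1)
            then (acc.1 + (dfsRec grid f (x + d.1) (y + d.2) acc.2).1, (dfsRec grid f (x + d.1) (y + d.2) acc.2).2)
            else acc) (a, s0) l).2.Nodup ∧
          (List.foldl (fun acc d =>
            if 0 ≤ x + d.1 ∧ x + d.1 < (grid.length : Int) ∧ 0 ≤ y + d.2 ∧ y + d.2 < pvRowLen grid (x + d.1)
                ∧ pvVal grid (x + d.1) (y + d.2) = some (c + 1)
            then (acc.1 + (dfsRec grid f (x + d.1) (y + d.2) acc.2).1, (dfsRec grid f (x + d.1) (y + d.2) acc.2).2)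
            else acc) (a, s0) l).2.toFinset
            = s0.toFinset ∪ unN grid ((l.filter (pvOkB grid x y c)).map (pvChild x y)) := by
        intro l
        induction l with
        | nil =>
          intro a s0 hs0
          exact ⟨by simp [sumP], hs0, by simp [unN, unFold]⟩
        | cons d l ihl =>
          intro a s0 hs0
          by_cases hok : 0 ≤ x + d.1 ∧ x + d.1 < (grid.length : Int) ∧ 0 ≤ y + d.2 ∧ y + d.2 < pvRowLen grid (x + d.1)
              ∧ pvVal grid (x + d.1) (y + d.2) = some (c + 1)
          · have hokb : pvOkB grid x y c d = true := decide_eq_true hok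
            have hvch : pvVal grid (x + d.1) (y + d.2) = some (c + 1) := hok.2.2.2.2
            have hfch : (10 - (c + 1)).toNat ≤ f := by omega
            obtain ⟨hr1, hr2, hr3⟩ := ih (x + d.1) (y + d.2) (c + 1) s0 hvch hfch hs0
            obtain ⟨hl1, hl2, hl3⟩ := ihl (a + (dfsRec grid f (x + d.1) (y + d.2) s0).1)
              (dfsRec grid f (x + d.1) (y + d.2) s0).2 hr2
            simp only [List.foldl_cons, List.filter_cons_of_pos hokb, List.map_cons, sumP_cons,
              unN_cons, pvChild, if_pos hok]
            refine ⟨?_, hl2, ?_⟩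
            · rw [hl1, hr1]; ring
            · rw [hl3, hr3, Finset.union_assoc]
          · have hokb : pvOkB grid x y c d = false := decide_eq_false hok
            have hfilt : List.filter (pvOkB grid x y c) (d :: l) = List.filter (pvOkB grid x y c) l := by
              simp [hokb]
            simp only [List.foldl_cons, hfilt, if_neg hok]
            exact ihl a s0 hs0
      obtain ⟨h1, h2, h3⟩ := main pvDirs 0 s hs
      refine ⟨?_, h2, ?_⟩
      · rw [h1, hfp]; show (0:Int) + sumP grid (childrenL grid x y c) = _; ring
      · rw [h3, hfn]; rfl

theorem dfsNbrs_eq (grid : List String) (visited : PySem.Set (Int × Int)) (x y c : Int)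
    (q0 : List (Int × Int)) (h : ∀ p ∈ childrenL grid x y c, p ∉ visited) :
    dfsNbrs grid visited x y c q0 = q0 ++ childrenL grid x y c := by
  have h' : ∀ d ∈ pvDirs,
      (0 ≤ x + d.1 ∧ x + d.1 < (grid.length : Int) ∧ 0 ≤ y + d.2 ∧ y + d.2 < pvRowLen grid (x + d.1)
        ∧ pvVal grid (x + d.1) (y + d.2) = some (c + 1)) → (x + d.1, y + d.2) ∉ visited := by
    intro d hdm hok
    apply h
    simp only [childrenL, List.mem_map, List.mem_filter]
    exact ⟨d, ⟨hdm, decide_eq_true hok⟩, rfl⟩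
  unfold dfsNbrs childrenL
  generalize hl : pvDirs = l at h' ⊢
  clear hl
  induction l generalizing q0 with
  | nil => simp
  | cons d l ihl =>
    by_cases hok : 0 ≤ x + d.1 ∧ x + d.1 < (grid.length : Int) ∧ 0 ≤ y + d.2 ∧ y + d.2 < pvRowLen grid (x + d.1)
        ∧ pvVal grid (x + d.1) (y + d.2) = some (c + 1)
    · have hokb : pvOkB grid x y c d = true := decide_eq_true hok
      obtain ⟨b1, b2, b3, b4, b5⟩ := hok
      have hnm := h' d (by simp) ⟨b1, b2, b3, b4, b5⟩
      simp only [List.foldl_cons, if_pos (⟨b1, b2, b3, b4, hnm, b5⟩ :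
        0 ≤ x + d.1 ∧ x + d.1 < (grid.length : Int) ∧ 0 ≤ y + d.2 ∧ y + d.2 < pvRowLen grid (x + d.1)
          ∧ (x + d.1, y + d.2) ∉ visited ∧ pvVal grid (x + d.1) (y + d.2) = some (c + 1)),
        List.filter_cons_of_pos hokb, List.map_cons]
      rw [ihl (q0 ++ [(x + d.1, y + d.2)]) (fun d hdm => h' d (List.mem_cons_of_mem _ hdm))]
      simp [pvChild]
    · have hokb : pvOkB grid x y c d = false := decide_eq_false hok
      have hfilt : List.filter (pvOkB grid x y c) (d :: l) = List.filter (pvOkB grid x y c) l := by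
        simp [hokb]
      have hcnd : ¬(0 ≤ x + d.1 ∧ x + d.1 < (grid.length : Int) ∧ 0 ≤ y + d.2 ∧ y + d.2 < pvRowLen grid (x + d.1)
          ∧ (x + d.1, y + d.2) ∉ visited ∧ pvVal grid (x + d.1) (y + d.2) = some (c + 1)) := by
        intro hc
        exact hok ⟨hc.1, hc.2.1, hc.2.2.1, hc.2.2.2.1, hc.2.2.2.2.2⟩
      simp only [List.foldl_cons, if_neg hcnd, hfilt]
      exact ihl q0 (fun d hdm => h' d (List.mem_cons_of_mem _ hdm))

theorem loopA (grid : List String) (hd : DomGrid grid) :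
    ∀ fuel (q : List (Int × Int)) (c0 : Int) (lo hi : List (Int × Int))
      (visited nines : PySem.Set (Int × Int)) (part2 : Int),
    q = lo ++ hi →
    (∀ p ∈ lo, pvVal grid p.1 p.2 = some c0) →
    (∀ p ∈ hi, pvVal grid p.1 p.2 = some (c0 + 1)) →
    (∀ v ∈ visited, ∃ cv, pvVal grid v.1 v.2 = some cv ∧ cv ≤ c0) →
    nines.Nodup →
    phi grid q < fuel →
    (dfsLoop grid fuel q visited nines part2).2 = part2 + sumP grid q ∧
    (dfsLoop grid fuel q visited nines part2).1.Nodup ∧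
    (dfsLoop grid fuel q visited nines part2).1.toFinset = nines.toFinset ∪ unN grid q := by
  intro fuel
  induction fuel with
  | zero =>
    intro q c0 lo hi visited nines part2 hq hlo hhi hv hn hphi
    omega
  | succ f ih =>
    intro q c0 lo hi visited nines part2 hq hlo hhi hv hn hphi
    cases q with
    | nil => refine ⟨?_, hn, ?_⟩ <;> simp [dfsLoop, sumP, unN, unFold]
    | cons p rest =>
      obtain ⟨x, y⟩ := p
      have key : ∃ c1 lo2 hi2, pvVal grid x y = some c1 ∧ rest = lo2 ++ hi2 ∧
          (∀ p ∈ lo2, pvVal grid p.1 p.2 = some c1) ∧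
          (∀ p ∈ hi2, pvVal grid p.1 p.2 = some (c1 + 1)) ∧
          (∀ v ∈ visited, ∃ cv, pvVal grid v.1 v.2 = some cv ∧ cv ≤ c1) := by
        cases lo with
        | nil =>
          simp only [List.nil_append] at hq
          subst hq
          refine ⟨c0 + 1, rest, [], hhi (x, y) (by simp), by simp, ?_, by simp, ?_⟩
          · intro p hp
            exact hhi p (by simp [hp])
          · intro v hvm
            obtain ⟨cv, h1, h2⟩ := hv v hvm
            exact ⟨cv, h1, by omega⟩
        | cons p0 lo2 =>
          simp only [List.cons_append, List.cons.injEq] at hq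
          obtain ⟨rfl, rfl⟩ := hq
          refine ⟨c0, lo2, hi, hlo (x, y) (by simp), rfl, fun p hp => hlo p (by simp [hp]), hhi, hv⟩
      obtain ⟨c1, lo2, hi2, hval, hrest, hlo2, hhi2, hvis⟩ := key
      obtain ⟨hc0b, hc9b⟩ := val_bounds grid x y c1 hd hval
      have hvis' : ∀ v ∈ PySem.Set.add visited (x, y),
          ∃ cv, pvVal grid v.1 v.2 = some cv ∧ cv ≤ c1 := by
        intro v hvm
        rcases (PySem.Set.mem_add visited (x, y) v).mp hvm with hvm | rfl
        · exact hvis v hvm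
        · exact ⟨c1, hval, le_refl c1⟩
      by_cases h9 : c1 = 9
      · subst h9
        simp only [dfsLoop, hval, if_true]
        have hw : wgt grid (x, y) = 1 := by simp [wgt, hval]
        have hphi' : phi grid rest < f := by
          rw [phi_cons, hw] at hphi
          omega
        obtain ⟨hP, hN, hT⟩ := ih rest 9 lo2 hi2 (PySem.Set.add visited (x, y))
          (PySem.Set.add nines (x, y)) (part2 + 1) hrest hlo2 hhi2 hvis'
          (PySem.Set.nodup_add _ _ hn) hphi'
        obtain ⟨hp1, hn1⟩ := fP_nine grid x y hval
        refine ⟨?_, hN, ?_⟩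
        · rw [hP, sumP_cons, hp1]; ring
        · rw [hT, toFinset_add, unN_cons, hn1, Finset.insert_eq]
          rw [← Finset.union_assoc, Finset.union_comm {(x, y)} nines.toFinset, Finset.union_assoc]
      · simp only [dfsLoop, hval, if_neg h9]
        have hch := mem_childrenL grid x y c1
        have hnvis : ∀ p ∈ childrenL grid x y c1, p ∉ PySem.Set.add visited (x, y) := by
          intro p hp hmem
          have hvp := hch p hp
          obtain ⟨cv, h1, h2⟩ := hvis' p hmem
          rw [hvp] at h1
          injection h1 with h1
          omega
        rw [dfsNbrs_eq grid (PySem.Set.add visited (x, y)) x y c1 rest hnvis]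
        have hK : (9 - c1).toNat = (9 - (c1 + 1)).toNat + 1 := by omega
        have hwx : wgt grid (x, y) = 5 ^ ((9 - (c1 + 1)).toNat + 1) := by
          simp only [wgt, hval, hK]
        have hphich : phi grid (childrenL grid x y c1) ≤ 4 * 5 ^ (9 - (c1 + 1)).toNat := by
          have hconst : (childrenL grid x y c1).map (wgt grid)
              = (childrenL grid x y c1).map (fun _ => 5 ^ (9 - (c1 + 1)).toNat) := by
            apply List.map_congr_left
            intro p hp
            simp only [wgt, hch p hp]
          have hlen := len_childrenL grid x y c1
          calc phi grid (childrenL grid x y c1)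
              = ((childrenL grid x y c1).map (fun _ => 5 ^ (9 - (c1 + 1)).toNat)).sum := by
                rw [phi, hconst]
            _ = (childrenL grid x y c1).length * 5 ^ (9 - (c1 + 1)).toNat := by
                rw [List.map_const', List.sum_replicate, smul_eq_mul]
            _ ≤ 4 * 5 ^ (9 - (c1 + 1)).toNat := by
                exact Nat.mul_le_mul_right _ hlen
        have hphi' : phi grid (rest ++ childrenL grid x y c1) < f := by
          rw [phi_append]
          rw [phi_cons, hwx] at hphi
          have h5 : (5:Nat) ^ ((9 - (c1 + 1)).toNat + 1) = 5 ^ (9 - (c1 + 1)).toNat * 5 := pow_succ 5 _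
          have hpos : 0 < (5:Nat) ^ (9 - (c1 + 1)).toNat := pow_pos (by omega : 0 < (5:Nat)) _
          omega
        obtain ⟨hP, hN, hT⟩ := ih (rest ++ childrenL grid x y c1) c1 lo2
          (hi2 ++ childrenL grid x y c1) (PySem.Set.add visited (x, y)) nines part2
          (by rw [hrest, List.append_assoc]) hlo2
          (by
            intro p hp
            rcases List.mem_append.mp hp with hp | hp
            · exact hhi2 p hp
            · exact hch p hp)
          hvis' hn hphi'
        obtain ⟨hfp, hfn⟩ := fP_step grid x y c1 hd hval h9
        refine ⟨?_, hN, ?_⟩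
        · rw [hP, sumP_append, sumP_cons, hfp]; ring
        · rw [hT, unN_append, unN_cons, hfn, Finset.union_comm (unN grid rest)]

-- ===== VERDICT (by name: the statement is the Claim_ definition above) =====
theorem dfs_spec : Claim_equal_dfs := by
  intro grid i j hdom hpre
  have hd : DomGrid grid := by
    simp only [Dom_dfs, Bool.and_eq_true, List.all_eq_true, pvDomStr] at hdom
    exact hdom.1.1
  have hval : ∃ c0, pvVal grid i j = some c0 := by
    have hpre' := hpre
    unfold Pre_dfs at hpre'
    cases hv : pvVal grid i j with
    | none =>
      rw [show (10:Nat) = 9 + 1 from rfl] at hpre'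
      simp only [pvReadsOK, hv] at hpre'
      exact absurd hpre' (by simp)
    | some c0 => exact ⟨c0, rfl⟩
  obtain ⟨c0, hc⟩ := hval
  obtain ⟨hb0, hb9⟩ := val_bounds grid i j c0 hd hc
  have hphi : phi grid [(i, j)] < 1953126 := by
    have h1 : wgt grid (i, j) = 5 ^ (9 - c0).toNat := by simp [wgt, hc]
    have h2 : (5:Nat) ^ (9 - c0).toNat ≤ 5 ^ 9 := Nat.pow_le_pow_right (by omega) (by omega)
    have h3 : (5:Nat) ^ 9 = 1953125 := by norm_num
    have h4 : phi grid [(i, j)] = wgt grid (i, j) := by simp [phi]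
    omega
  obtain ⟨hP, hN, hT⟩ := loopA grid hd 1953126 [(i, j)] c0 [(i, j)] [] PySem.Set.empty
    PySem.Set.empty 0 (by simp) (by intro p hp; simp at hp; rw [hp]; exact hc) (by simp)
    (by intro v hv; simp [PySem.Set.empty] at hv) List.nodup_nil hphi
  obtain ⟨hb1, hb2, hb3⟩ := recB_spec grid hd 10 i j c0 PySem.Set.empty hc (by omega) List.nodup_nil
  have hsum : sumP grid [(i, j)] = fP grid (i, j) := by simp [sumP]
  have hun : unN grid [(i, j)] = fN grid (i, j) := by simp [unN, unFold]
  have hlen : (dfsLoop grid 1953126 [(i, j)] PySem.Set.empty PySem.Set.empty 0).1.length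
      = (dfsRec grid 10 i j PySem.Set.empty).2.length := by
    rw [← List.toFinset_card_of_nodup hN, ← List.toFinset_card_of_nodup hb2, hT, hb3, hun]
  show dfs grid i j = dfs_alt grid i j
  simp only [dfs, dfs_alt]
  apply Prod.ext_iff.mpr
  constructor
  · show ((dfsLoop grid 1953126 [(i, j)] PySem.Set.empty PySem.Set.empty 0).1.length : Int)
        = ((dfsRec grid 10 i j PySem.Set.empty).2.length : Int)
    exact congrArg (fun n : Nat => (n : Int)) hlen
  · show (dfsLoop grid 1953126 [(i, j)] PySem.Set.empty PySem.Set.empty 0).2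
        = (dfsRec grid 10 i j PySem.Set.empty).1
    rw [hP, hb1, hsum]
    exact zero_add _
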